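-- pv_equiv track=rewrite | github.com/kergene/advent-code | 2018/code_day_05.py | reduce_ignoring
-- ===== SOURCE A (Python) =====
-- def reduce_ignoring(data, ignore):
--     new_list = []
--     for new_item in data:
--         if new_item == ignore or new_item == ignore + 32:
--             continue
--         else:
--             if not new_list:
--                 new_list.append(new_item)
--             else:
--                 if abs(new_list[-1] - new_item) == 32:
--                     new_list.pop()
--                 else:
--                     new_list.append(new_item)
--     return new_list
-- ===== SOURCE B (Python) =====
-- def _reduce_once(units):
--     # remove the first adjacent reacting pair, if any
--     for i in range(len(units) - 1):
--         if abs(units[i] - units[i + 1]) == 32: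
--             return units[:i] + units[i + 2:], True
--     return units, False
--
--
-- def reduce_ignoring(data, ignore):
--     units = [x for x in data if x != ignore and x != ignore + 32]
--     changed = True
--     while changed:
--         units, changed = _reduce_once(units)
--     return units
-- ===== Notes on version B (the rewrite author's own statement) =====
-- stated objective: alternative
-- what changed: Replaces the single stack pass with filter-out-ignored-units first, then repeated scan-and-delete of the first adjacent reacting pair until a fixpoint; equal by confluence of the reduction.
import Mathlib
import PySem

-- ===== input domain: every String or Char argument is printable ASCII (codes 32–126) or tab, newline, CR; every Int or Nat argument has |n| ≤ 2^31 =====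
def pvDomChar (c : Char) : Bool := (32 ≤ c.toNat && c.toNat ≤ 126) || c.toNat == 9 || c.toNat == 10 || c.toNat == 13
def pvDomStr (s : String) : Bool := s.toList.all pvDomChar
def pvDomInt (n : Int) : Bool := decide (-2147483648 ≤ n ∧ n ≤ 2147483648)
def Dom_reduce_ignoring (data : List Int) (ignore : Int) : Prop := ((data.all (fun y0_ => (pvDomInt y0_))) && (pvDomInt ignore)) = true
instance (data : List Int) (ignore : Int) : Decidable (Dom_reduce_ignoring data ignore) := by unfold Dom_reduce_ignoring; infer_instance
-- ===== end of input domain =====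

-- B replaces A's single stack pass by: filter out the ignored unit first, then repeatedly
-- delete the first adjacent reacting pair until a fixpoint (equal by confluence of the reduction).

-- ===== PORT A =====
-- the body of A's for-loop: skip ignored units, else push / cancel against the last element
def pvStepA (ignore : Int) (new_list : List Int) (new_item : Int) : List Int :=
  if new_item = ignore ∨ new_item = ignore + 32 then new_list
  else if new_list = [] then new_list ++ [new_item]
  else if (new_list.getLast! - new_item).natAbs = 32 then new_list.dropLast
  else new_list ++ [new_item]

def reduce_ignoring (data : List Int) (ignore : Int) : List Int :=
  data.foldl (pvStepA ignore) []

-- ===== PORT B =====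
-- _reduce_once: remove the first adjacent pair differing by 32, if any
def pvReduceOnce : List Int → Option (List Int)
  | a :: b :: rest =>
      if (a - b).natAbs = 32 then some rest
      else (pvReduceOnce (b :: rest)).map (fun r => a :: r)
  | _ => none

theorem pvReduceOnce_length : ∀ {l u : List Int}, pvReduceOnce l = some u → u.length < l.length := by
  intro l
  induction l with
  | nil => intro u h; simp [pvReduceOnce] at h
  | cons a t ih =>
    intro u h
    match t with
    | [] => simp [pvReduceOnce] at h
    | b :: rest =>
      by_cases hr : (a - b).natAbs = 32
      · simp [pvReduceOnce, hr] at h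
        subst h
        simp only [List.length_cons]
        omega
      · simp [pvReduceOnce, hr] at h
        obtain ⟨r, hr1, hr2⟩ := h
        have := ih hr1
        subst hr2
        simp at this ⊢
        omega

-- the while-loop of B: iterate _reduce_once to a fixpoint
def pvReduceFix (units : List Int) : List Int :=
  match h : pvReduceOnce units with
  | some u => pvReduceFix u
  | none => units
termination_by units.length
decreasing_by exact pvReduceOnce_length h

def reduce_ignoring_alt (data : List Int) (ignore : Int) : List Int :=
  pvReduceFix (data.filter (fun x => !(x == ignore || x == ignore + 32)))

-- ===== PRECONDITION & SPEC =====
def Spec_reduce_ignoring (data : List Int) (ignore : Int) (out : List Int) : Prop := out = reduce_ignoring_alt data ignore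
instance (data : List Int) (ignore : Int) (out : List Int) : Decidable (Spec_reduce_ignoring data ignore out) := by unfold Spec_reduce_ignoring; infer_instance

-- ===== CLAIM (what is proved, stated in full; the proofs are below) =====
def Claim_equal_reduce_ignoring : Prop := ∀ (data : List Int) (ignore : Int), Dom_reduce_ignoring data ignore → Spec_reduce_ignoring data ignore (reduce_ignoring data ignore)

-- ===== LEMMAS AND PROOFS =====

-- the stack step of A on a reversed (head = top) stack, ignored units already filtered out
def pvRStep (s : List Int) (x : Int) : List Int :=
  match s with
  | [] => [x]
  | t :: r => if (t - x).natAbs = 32 then r else x :: t :: r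

-- "a and b do not react"
def pvNotR (a b : Int) : Prop := (a - b).natAbs ≠ 32

-- no adjacent reacting pair in the list
def pvGood : List Int → Prop
  | a :: b :: t => pvNotR a b ∧ pvGood (b :: t)
  | _ => True

-- the head of the stack does not react with the head of the remaining input
def pvCompat (s l : List Int) : Prop :=
  ∀ a b, s.head? = some a → l.head? = some b → pvNotR a b

theorem pvCompat_nil_left (l : List Int) : pvCompat [] l := by
  intro a b h
  simp at h

theorem pvRStep_push {s : List Int} {x : Int} (h : pvCompat s [x]) :
    pvRStep s x = x :: s := by
  match s with
  | [] => rfl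
  | t :: r =>
    have ht : (t - x).natAbs ≠ 32 := h t x (by simp) (by simp)
    simp [pvRStep, ht]

-- A's appended-list step equals the reversed-stack step, on filtered items
theorem pvStepA_reverse (ignore : Int) (s : List Int) (x : Int) :
    pvStepA ignore s.reverse x =
      (if x = ignore ∨ x = ignore + 32 then s else pvRStep s x).reverse := by
  by_cases hig : x = ignore ∨ x = ignore + 32
  · simp [pvStepA, hig]
  · match s with
    | [] => simp [pvStepA, hig, pvRStep]
    | t :: r =>
      by_cases hr : (t - x).natAbs = 32
      · simp [pvStepA, hig, pvRStep, hr]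
      · simp [pvStepA, hig, pvRStep, hr]

-- fold A = reverse of the fold of the reversed-stack step
theorem pvFoldA_reverse (ignore : Int) :
    ∀ (l : List Int) (s : List Int),
      l.foldl (pvStepA ignore) s.reverse =
        (l.foldl (fun s x => if x = ignore ∨ x = ignore + 32 then s else pvRStep s x) s).reverse := by
  intro l
  induction l with
  | nil => intro s; rfl
  | cons x l ih =>
    intro s
    simp only [List.foldl_cons, pvStepA_reverse]
    exact ih _

-- the filtering fold equals the plain stack fold over the filtered list
theorem pvFold_filter (ignore : Int) :
    ∀ (l : List Int) (s : List Int),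
      l.foldl (fun s x => if x = ignore ∨ x = ignore + 32 then s else pvRStep s x) s =
        (l.filter (fun x => !(x == ignore || x == ignore + 32))).foldl pvRStep s := by
  intro l
  induction l with
  | nil => intro s; rfl
  | cons x l ih =>
    intro s
    by_cases hig : x = ignore ∨ x = ignore + 32
    · have hb : (fun x => !(x == ignore || x == ignore + 32)) x = false := by
        simp
        omega
      simp only [List.foldl_cons, if_pos hig, List.filter_cons, hb]
      exact ih s
    · have hb : (fun x => !(x == ignore || x == ignore + 32)) x = true := by
        simp
        constructor
        · intro h; exact hig (Or.inl h)
        · intro h; exact hig (Or.inr h)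
      simp only [List.foldl_cons, if_neg hig, List.filter_cons, hb, ite_true]
      exact ih _

-- removing the first reacting pair does not change the stack fold
theorem pvFold_reduceOnce :
    ∀ (l : List Int) (s u : List Int), pvGood s → pvCompat s l →
      pvReduceOnce l = some u → l.foldl pvRStep s = u.foldl pvRStep s := by
  intro l
  induction l with
  | nil => intro s u _ _ h; simp [pvReduceOnce] at h
  | cons a t ih =>
    intro s u hgood hcomp h
    match t with
    | [] => simp [pvReduceOnce] at h
    | b :: rest =>
      have hpush : pvRStep s a = a :: s :=
        pvRStep_push (fun p q hp hq => hcomp p q hp (by simp at hq; simp [hq]))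
      by_cases hr : (a - b).natAbs = 32
      · simp [pvReduceOnce, hr] at h
        subst h
        have hpop : pvRStep (a :: s) b = s := by
          simp [pvRStep, hr]
        rw [List.foldl_cons, List.foldl_cons, hpush, hpop]
      · simp [pvReduceOnce, hr] at h
        obtain ⟨r, hr1, hr2⟩ := h
        subst hr2
        have hgood' : pvGood (a :: s) := by
          match s with
          | [] => simp [pvGood]
          | t' :: r' =>
            have := hcomp t' a (by simp) (by simp)
            exact ⟨fun hc => this (by unfold pvNotR at *; omega), hgood⟩
        have hcomp' : pvCompat (a :: s) (b :: rest) := by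
          intro p q hp hq
          simp at hp hq
          subst hp; subst hq
          exact hr
        have hrec := ih (a :: s) r hgood' hcomp' hr1
        rw [List.foldl_cons, hpush]
        conv_rhs => rw [List.foldl_cons, hpush]
        exact hrec

-- a list with no reacting pair is left unchanged by _reduce_once …
theorem pvReduceOnce_none :
    ∀ (l : List Int), pvReduceOnce l = none → pvGood l := by
  intro l
  induction l with
  | nil => intro _; trivial
  | cons a t ih =>
    intro h
    match t with
    | [] => trivial
    | b :: rest =>
      by_cases hr : (a - b).natAbs = 32
      · simp [pvReduceOnce, hr] at h
      · simp [pvReduceOnce, hr] at h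
        exact ⟨hr, ih h⟩

-- … and is a fixpoint of the stack fold (it comes out reversed onto the stack)
theorem pvFold_good :
    ∀ (l : List Int) (s : List Int), pvGood l → pvCompat s l →
      l.foldl pvRStep s = l.reverse ++ s := by
  intro l
  induction l with
  | nil => intro s _ _; rfl
  | cons a t ih =>
    intro s hgood hcomp
    have hpush : pvRStep s a = a :: s :=
      pvRStep_push (fun p q hp hq => hcomp p q hp (by simp at hq; simp [hq]))
    have hgood' : pvGood t := by
      match t, hgood with
      | [], _ => trivial
      | b :: rest, hgood => exact hgood.2
    have hcomp' : pvCompat (a :: s) t := by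
      intro p q hp hq
      simp at hp
      subst hp
      match t, hq with
      | b :: rest, hq =>
        simp at hq
        subst hq
        exact hgood.1
    rw [List.foldl_cons, hpush, ih (a :: s) hgood' hcomp']
    simp

-- the fixpoint iteration computes the reverse of the stack fold
theorem pvReduceFix_eq : ∀ (l : List Int), pvReduceFix l = (l.foldl pvRStep []).reverse := by
  intro l
  induction l using pvReduceFix.induct with
  | case1 l u h ih =>
    rw [pvReduceFix]
    split
    next u' h' =>
      rw [h] at h'
      obtain rfl := Option.some.inj h'
      rw [ih, pvFold_reduceOnce l [] _ trivial (pvCompat_nil_left l) h]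
    next h' => rw [h] at h'; cases h'
  | case2 l h =>
    rw [pvReduceFix]
    split
    next u' h' => rw [h] at h'; cases h'
    next _ =>
      rw [pvFold_good l [] (pvReduceOnce_none l h) (pvCompat_nil_left l)]
      simp

-- ===== VERDICT (by name: the statement is the Claim_ definition above) =====
theorem reduce_ignoring_spec : Claim_equal_reduce_ignoring := by
  intro data ignore _
  unfold Spec_reduce_ignoring reduce_ignoring reduce_ignoring_alt
  have h0 : ([] : List Int) = ([] : List Int).reverse := rfl
  rw [h0, pvFoldA_reverse, pvFold_filter, pvReduceFix_eq]
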